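-- pv_equiv track=rewrite | github.com/cokemania2/LeetCode | 백준/Silver/10815. 숫자 카드/숫자 카드.py | solution
-- ===== SOURCE A (Python) =====
-- def is_exist(card_length, sorted_card_list, m):
--     start = 0
--     end = card_length - 1
--     while start <= end:
--         mid = start + (end - start) // 2
--         if sorted_card_list[mid] == m:
--             return True
--         elif sorted_card_list[mid] < m:
--             start = mid + 1
--         else:
--             end = mid - 1
--     return False
--
-- def solution(N, M, card_list, m_list):
--     answer = []
--     card_list.sort()
--     for m in m_list:
--         if is_exist(N, card_list, m):
--             answer.append(1)
--         else:
--             answer.append(0)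
--     return answer
-- ===== SOURCE B (Python) =====
-- def solution(N, M, card_list, m_list):
--     card_list.sort()
--     answer = [0] * len(m_list)
--     j = 0
--     for i, m in sorted(enumerate(m_list), key=lambda p: p[1]):
--         while j < N and card_list[j] < m:
--             j += 1
--         if j < N and card_list[j] == m:
--             answer[i] = 1
--     return answer
-- ===== Notes on version B (the rewrite author's own statement) =====
-- stated objective: alternative
-- what changed: Per-query binary search is replaced by sorting the queries together with their positions and answering them all in one merged two-pointer sweep over the sorted cards; Pre_ excludes inputs with N > len(card_list) and a nonempty query list, where A's binary search indexes past the end of the sorted list and raises IndexError on most queries.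
-- outside the precondition, e.g. on solution(2, 1, [5], [5]): A returns [1], B returns [1]; on solution(3, 1, [1], [1]): A raises IndexError, B returns [1]
import Mathlib
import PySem

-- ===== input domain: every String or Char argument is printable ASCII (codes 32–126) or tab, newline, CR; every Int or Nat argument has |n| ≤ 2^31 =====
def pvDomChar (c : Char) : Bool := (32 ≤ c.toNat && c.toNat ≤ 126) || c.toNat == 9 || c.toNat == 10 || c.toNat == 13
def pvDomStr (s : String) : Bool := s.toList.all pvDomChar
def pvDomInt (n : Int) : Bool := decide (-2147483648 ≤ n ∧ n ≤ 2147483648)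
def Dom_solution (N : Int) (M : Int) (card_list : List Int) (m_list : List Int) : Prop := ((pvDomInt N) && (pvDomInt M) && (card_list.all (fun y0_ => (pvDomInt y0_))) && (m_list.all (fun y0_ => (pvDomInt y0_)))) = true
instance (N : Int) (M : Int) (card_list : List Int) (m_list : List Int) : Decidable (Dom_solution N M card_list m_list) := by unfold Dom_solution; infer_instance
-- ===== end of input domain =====

-- B answers all queries in one merged two-pointer sweep (queries sorted with their positions)
-- instead of A's per-query binary search; both Pythons sort card_list in place (same mutation),
-- and the equivalence proved here is about the return value.

-- ===== PORT A =====
-- the while-loop of is_exist, with start/end ("stop") as arguments; pyGet? = none is Python's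
-- IndexError (excluded by Pre_solution) and the port returns false there
def isExistLoop (s : List Int) (m : Int) (start stop : Int) : Bool :=
  if _h : start ≤ stop then
    let mid := start + PySem.Int.floordiv (stop - start) 2
    match PySem.List.pyGet? s mid with
    | none => false
    | some v =>
      if v = m then true
      else if v < m then isExistLoop s m (mid + 1) stop
      else isExistLoop s m start (mid - 1)
  else false
termination_by (stop + 1 - start).toNat
decreasing_by
  all_goals
    rw [PySem.Int.floordiv_eq_ediv_of_pos (by norm_num : (0:Int) < 2)] at *
    omega

def isExist (card_length : Int) (sorted_card_list : List Int) (m : Int) : Bool :=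
  isExistLoop sorted_card_list m 0 (card_length - 1)

def solution (N : Int) (M : Int) (card_list : List Int) (m_list : List Int) : List Int :=
  let cl := PySem.List.sorted card_list (fun x => x) false
  m_list.foldl (fun answer m => if isExist N cl m then answer ++ [1] else answer ++ [0]) []

-- ===== PORT B =====
-- the while-loop 'while j < N and card_list[j] < m: j += 1'; pyGet? = none is Python's
-- IndexError (excluded by Pre_solution) and the port stops there
def bAdvance (cl : List Int) (N : Int) (m : Int) (j : Int) : Int :=
  if _h : j < N then
    match PySem.List.pyGet? cl j with
    | none => j
    | some v => if v < m then bAdvance cl N m (j + 1) else j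
  else j
termination_by (N - j).toNat

-- one iteration of B's for-loop: advance the card pointer, set answer[i] on a hit
def bStep (cl : List Int) (N : Int) (st : List Int × Int) (p : Int × Int) : List Int × Int :=
  let j := bAdvance cl N p.2 st.2
  if j < N ∧ PySem.List.pyGet? cl j = some p.2 then (st.1.set p.1.toNat 1, j) else (st.1, j)

def solution_alt (N : Int) (M : Int) (card_list : List Int) (m_list : List Int) : List Int :=
  let cl := PySem.List.sorted card_list (fun x => x) false
  ((PySem.List.sorted (PySem.List.enumerate m_list) (fun p => p.2) false).foldl
      (bStep cl N) (List.replicate m_list.length 0, 0)).1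

-- ===== PRECONDITION & SPEC =====
-- Pre_ excludes inputs with N > len(card_list) and a nonempty query list: there A's binary
-- search (and B's sweep) addresses indices past the end of the sorted list and raises
-- IndexError for most queries (where A happens to return, it agrees with B, e.g. the first cite).
def Pre_solution (N : Int) (M : Int) (card_list : List Int) (m_list : List Int) : Prop :=
  N ≤ (card_list.length : Int) ∨ m_list = []
instance (N : Int) (M : Int) (card_list : List Int) (m_list : List Int) : Decidable (Pre_solution N M card_list m_list) := by unfold Pre_solution; infer_instance

def pvWitness_solution : Int × Int × List Int × List Int := (3, 2, [7, 2, 5], [5, 9])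

def Spec_solution (N : Int) (M : Int) (card_list : List Int) (m_list : List Int) (out : List Int) : Prop := out = solution_alt N M card_list m_list
instance (N : Int) (M : Int) (card_list : List Int) (m_list : List Int) (out : List Int) : Decidable (Spec_solution N M card_list m_list out) := by unfold Spec_solution; infer_instance

-- ===== CLAIM (what is proved, stated in full; the proofs are below) =====
def Claim_equal_solution : Prop := ∀ (N : Int) (M : Int) (card_list : List Int) (m_list : List Int), Dom_solution N M card_list m_list → Pre_solution N M card_list m_list → Spec_solution N M card_list m_list (solution N M card_list m_list)

-- ===== LEMMAS AND PROOFS =====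

lemma sorted_mono (s : List Int) (hs : s.Pairwise (· ≤ ·)) (i j : ℕ) (hij : i ≤ j) (hj : j < s.length) :
    s[i]'(by omega) ≤ s[j] := by
  rcases Nat.lt_or_ge i j with h | h
  · exact (List.pairwise_iff_getElem.mp hs) i j (by omega) hj h
  · have heq : i = j := by omega
    subst heq; rfl

-- binary search over a window of a sorted list finds m iff m occurs at some index in the window
lemma isExistLoop_eq_true_iff (s : List Int) (m : Int) (start stop : Int)
    (hs : s.Pairwise (· ≤ ·)) (h0 : 0 ≤ start) (hstop : stop < (s.length : Int)) :
    isExistLoop s m start stop = true ↔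
      ∃ i : Int, start ≤ i ∧ i ≤ stop ∧ PySem.List.pyGet? s i = some m := by
  revert h0 hstop
  induction start, stop using isExistLoop.induct (s := s) (m := m) with
  | case1 start stop h mid hget =>
    intro h0 hstop
    exfalso
    rw [show (mid:ℤ) = start + PySem.Int.floordiv (stop - start) 2 from rfl,
        PySem.Int.floordiv_eq_ediv_of_pos (by norm_num : (0:Int) < 2),
        PySem.List.pyGet?_eq_none_iff] at hget
    exact hget ⟨by omega, by omega⟩
  | case2 start stop h mid hget =>
    intro h0 hstop
    have hb := PySem.Int.floordiv_eq_ediv_of_pos (by norm_num : (0:Int) < 2) (a := stop - start)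
    rw [show (mid:ℤ) = start + PySem.Int.floordiv (stop - start) 2 from rfl] at hget
    rw [isExistLoop]
    simp only [dif_pos h, hget, if_true, true_iff]
    exact ⟨start + PySem.Int.floordiv (stop - start) 2, by rw [hb] at *; omega,
           by rw [hb] at *; omega, hget⟩
  | case3 start stop h mid v hget hne hlt ih =>
    intro h0 hstop
    have hb := PySem.Int.floordiv_eq_ediv_of_pos (by norm_num : (0:Int) < 2) (a := stop - start)
    rw [show (mid:ℤ) = start + PySem.Int.floordiv (stop - start) 2 from rfl] at hget
    have hmb : start ≤ start + PySem.Int.floordiv (stop - start) 2 ∧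
        start + PySem.Int.floordiv (stop - start) 2 ≤ stop := by rw [hb]; omega
    rw [isExistLoop]
    simp only [dif_pos h, hget, if_neg hne, if_pos hlt]
    rw [ih (by omega) hstop]
    constructor
    · rintro ⟨i, h1, h2, h3⟩; exact ⟨i, by omega, h2, h3⟩
    · rintro ⟨i, h1, h2, h3⟩
      refine ⟨i, ?_, h2, h3⟩
      by_contra hcon
      have hi0 : 0 ≤ i := by omega
      have hilen : i < (s.length : Int) := by omega
      rw [PySem.List.pyGet?_eq_some_getElem s hi0 hilen] at h3
      rw [PySem.List.pyGet?_eq_some_getElem s (by omega) (by omega)] at hget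
      simp only [Option.some.injEq] at h3 hget
      have := sorted_mono s hs i.toNat (start + PySem.Int.floordiv (stop - start) 2).toNat
        (by omega) (by omega)
      omega
  | case4 start stop h mid v hget hne hge ih =>
    intro h0 hstop
    have hb := PySem.Int.floordiv_eq_ediv_of_pos (by norm_num : (0:Int) < 2) (a := stop - start)
    rw [show (mid:ℤ) = start + PySem.Int.floordiv (stop - start) 2 from rfl] at hget
    have hmb : start ≤ start + PySem.Int.floordiv (stop - start) 2 ∧
        start + PySem.Int.floordiv (stop - start) 2 ≤ stop := by rw [hb]; omega
    rw [isExistLoop]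
    simp only [dif_pos h, hget, if_neg hne, if_neg hge]
    rw [ih h0 (by omega)]
    constructor
    · rintro ⟨i, h1, h2, h3⟩; exact ⟨i, h1, by omega, h3⟩
    · rintro ⟨i, h1, h2, h3⟩
      refine ⟨i, h1, ?_, h3⟩
      by_contra hcon
      have hi0 : 0 ≤ i := by omega
      have hilen : i < (s.length : Int) := by omega
      rw [PySem.List.pyGet?_eq_some_getElem s hi0 hilen] at h3
      rw [PySem.List.pyGet?_eq_some_getElem s (by omega) (by omega)] at hget
      simp only [Option.some.injEq] at h3 hget
      have := sorted_mono s hs (start + PySem.Int.floordiv (stop - start) 2).toNat i.toNat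
        (by omega) (by omega)
      omega
  | case5 start stop h =>
    intro h0 hstop
    rw [isExistLoop, dif_neg h]
    simp only [Bool.false_eq_true, false_iff]
    rintro ⟨i, h1, h2, _⟩; omega

-- A's append-a-0/1 loop is a map over the queries
lemma foldl_if_append (p : Int → Bool) (l acc : List Int) :
    l.foldl (fun a m => if p m then a ++ [1] else a ++ [0]) acc
      = acc ++ l.map (fun m => if p m then (1:Int) else 0) := by
  induction l generalizing acc with
  | nil => simp
  | cons x t ih => by_cases h : p x <;> simp [h, ih]

-- with N ≤ len, the binary search over window [0, N-1] of the sorted list finds m iff m is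
-- among the first max(N,0) elements
lemma isExist_mem_take (c : List Int) (m N : Int) (hs : c.Pairwise (· ≤ ·))
    (hN : N ≤ (c.length : Int)) :
    (isExistLoop c m 0 (N - 1) = true) ↔ m ∈ c.take (max N 0).toNat := by
  rw [isExistLoop_eq_true_iff c m 0 (N - 1) hs (le_refl 0) (by omega)]
  rw [List.mem_take_iff_getElem]
  constructor
  · rintro ⟨i, h0, h1, h2⟩
    rw [PySem.List.pyGet?_eq_some_getElem c h0 (by omega)] at h2
    simp only [Option.some.injEq] at h2
    exact ⟨i.toNat, by omega, h2⟩
  · rintro ⟨i, hi, h2⟩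
    have hiN : (i : Int) ≤ N - 1 := by omega
    refine ⟨(i : Int), by omega, hiN, ?_⟩
    rw [PySem.List.pyGet?_eq_some_getElem c (by omega) (by omega)]
    simp only [Option.some.injEq, Int.toNat_natCast]
    exact h2

-- B's pointer advance: it preserves 0 ≤ j ≤ max N 0, every passed card is < m,
-- and it stops at the first card ≥ m (or at N)
lemma bAdvance_spec (cl : List Int) (N m j : Int) (hN : N ≤ (cl.length : Int))
    (hj0 : 0 ≤ j) (hjN : j ≤ max N 0) (hlt : ∀ k : ℕ, k < j.toNat → cl.getD k 0 < m) :
    0 ≤ bAdvance cl N m j ∧ bAdvance cl N m j ≤ max N 0 ∧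
      (∀ k : ℕ, k < (bAdvance cl N m j).toNat → cl.getD k 0 < m) ∧
      (bAdvance cl N m j < N → ¬ cl.getD (bAdvance cl N m j).toNat 0 < m) := by
  induction j using bAdvance.induct (cl := cl) (N := N) (m := m) with
  | case1 j h hget =>
    exfalso
    rw [PySem.List.pyGet?_eq_none_iff] at hget
    exact hget ⟨by omega, by omega⟩
  | case2 j h v hget hv ih =>
    have heq : bAdvance cl N m j = bAdvance cl N m (j + 1) := by
      rw [bAdvance, dif_pos h, hget]; exact if_pos hv
    have hjlen : j < (cl.length : Int) := by omega
    rw [PySem.List.pyGet?_eq_some_getElem cl hj0 hjlen] at hget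
    simp only [Option.some.injEq] at hget
    rw [heq]
    refine ih (by omega) (by omega) ?_
    intro k hk
    rcases Nat.lt_or_ge k j.toNat with h1 | h1
    · exact hlt k h1
    · have hk' : k = j.toNat := by omega
      subst hk'
      rw [List.getD_eq_getElem cl 0 (by omega)]
      omega
  | case3 j h v hget hv =>
    have heq : bAdvance cl N m j = j := by
      rw [bAdvance, dif_pos h, hget]; exact if_neg hv
    have hjlen : j < (cl.length : Int) := by omega
    rw [PySem.List.pyGet?_eq_some_getElem cl hj0 hjlen] at hget
    simp only [Option.some.injEq] at hget
    rw [heq]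
    refine ⟨hj0, hjN, hlt, ?_⟩
    intro _
    rw [List.getD_eq_getElem cl 0 (by omega)]
    omega
  | case4 j h =>
    rw [show bAdvance cl N m j = j from by rw [bAdvance, dif_neg h]]
    exact ⟨hj0, hjN, hlt, fun hc => absurd hc h⟩

-- after the advance, the hit test answers exactly "m is among the first max(N,0) sorted cards"
lemma hit_iff (cl : List Int) (N m j' : Int) (hs : cl.Pairwise (· ≤ ·))
    (hN : N ≤ (cl.length : Int)) (h0 : 0 ≤ j') (hle : j' ≤ max N 0)
    (hlt : ∀ k : ℕ, k < j'.toNat → cl.getD k 0 < m)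
    (hstop : j' < N → ¬ cl.getD j'.toNat 0 < m) :
    (j' < N ∧ PySem.List.pyGet? cl j' = some m) ↔ m ∈ cl.take (max N 0).toNat := by
  rw [List.mem_take_iff_getElem]
  constructor
  · rintro ⟨hjN, hget⟩
    rw [PySem.List.pyGet?_eq_some_getElem cl h0 (by omega)] at hget
    simp only [Option.some.injEq] at hget
    exact ⟨j'.toNat, by omega, hget⟩
  · rintro ⟨k, hk, hkm⟩
    have hklen : k < cl.length := by omega
    have hkj : j'.toNat ≤ k := by
      by_contra hc
      have := hlt k (by omega)
      rw [List.getD_eq_getElem cl 0 hklen] at this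
      omega
    have hjN : j' < N := by
      by_contra hc
      have hkj' : k < j'.toNat := by omega
      have := hlt k hkj'
      rw [List.getD_eq_getElem cl 0 hklen, hkm] at this
      exact absurd this (lt_irrefl m)
    refine ⟨hjN, ?_⟩
    have hjlen : j'.toNat < cl.length := by omega
    have hle2 : cl[j'.toNat] ≤ cl[k] := sorted_mono cl hs j'.toNat k hkj hklen
    have hge : ¬ cl[j'.toNat] < m := by
      have := hstop hjN
      rwa [List.getD_eq_getElem cl 0 hjlen] at this
    rw [PySem.List.pyGet?_eq_some_getElem cl h0 (by omega)]
    exact congrArg some (le_antisymm (hkm ▸ hle2) (not_lt.mp hge))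

-- B's fold over the (position, query) pairs, sorted by query value: it preserves the answer
-- length, leaves un-listed positions alone, and writes the membership bit at each listed position
lemma bFold_spec (cl : List Int) (N : Int) (hs : cl.Pairwise (· ≤ ·))
    (hN : N ≤ (cl.length : Int)) :
    ∀ (rest : List (Int × Int)) (ans : List Int) (j : Int),
    rest.Pairwise (fun a b => a.2 ≤ b.2) →
    (rest.map Prod.fst).Nodup →
    (∀ p ∈ rest, 0 ≤ p.1 ∧ p.1.toNat < ans.length) →
    (∀ p ∈ rest, ans.getD p.1.toNat 0 = 0) →
    0 ≤ j → j ≤ max N 0 →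
    (∀ p ∈ rest, ∀ k : ℕ, k < j.toNat → cl.getD k 0 < p.2) →
    (rest.foldl (bStep cl N) (ans, j)).1.length = ans.length ∧
      (∀ i : ℕ, (∀ p ∈ rest, p.1.toNat ≠ i) →
        (rest.foldl (bStep cl N) (ans, j)).1.getD i 0 = ans.getD i 0) ∧
      (∀ p ∈ rest, (rest.foldl (bStep cl N) (ans, j)).1.getD p.1.toNat 0
        = (if p.2 ∈ cl.take (max N 0).toNat then 1 else 0)) := by
  intro rest
  induction rest with
  | nil => intro ans j _ _ _ _ _ _ _; exact ⟨rfl, fun _ _ => rfl, fun p hp => absurd hp (List.not_mem_nil)⟩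
  | cons p tl ih =>
    intro ans j hsort hnd hidx h0 hj0 hjle hjlt
    have hadv := bAdvance_spec cl N p.2 j hN hj0 hjle (hjlt p (List.mem_cons_self) )
    set j' := bAdvance cl N p.2 j with hj'
    obtain ⟨ha0, hale, halt, hastop⟩ := hadv
    have hhit_iff := hit_iff cl N p.2 j' hs hN ha0 hale halt hastop
    have hp1 : 0 ≤ p.1 ∧ p.1.toNat < ans.length := hidx p (List.mem_cons_self)
    -- tail indices differ from the head index
    have hne_tl : ∀ q ∈ tl, q.1.toNat ≠ p.1.toNat := by
      intro q hq
      have hq1 : 0 ≤ q.1 := (hidx q (List.mem_cons_of_mem p hq)).1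
      have : p.1 ∉ tl.map Prod.fst := (List.nodup_cons.mp hnd).1
      intro hc
      exact this (by
        have : q.1 = p.1 := by omega
        rw [← this]
        exact List.mem_map_of_mem hq)
    have htl_sort : tl.Pairwise (fun a b => a.2 ≤ b.2) := (List.pairwise_cons.mp hsort).2
    have hhead_le : ∀ q ∈ tl, p.2 ≤ q.2 := (List.pairwise_cons.mp hsort).1
    have htl_nd : (tl.map Prod.fst).Nodup := (List.nodup_cons.mp hnd).2
    have htl_jlt : ∀ q ∈ tl, ∀ k : ℕ, k < j'.toNat → cl.getD k 0 < q.2 := by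
      intro q hq k hk
      exact lt_of_lt_of_le (halt k hk) (hhead_le q hq)
    by_cases hhit : j' < N ∧ PySem.List.pyGet? cl j' = some p.2
    · -- hit: answer[p.1] := 1
      have hstep : bStep cl N (ans, j) p = (ans.set p.1.toNat 1, j') := by
        simp only [bStep, ← hj', if_pos hhit]
      have hlen' : (ans.set p.1.toNat 1).length = ans.length := by simp
      have ih' := ih (ans.set p.1.toNat 1) j' htl_sort htl_nd
        (fun q hq => by rw [hlen']; exact hidx q (List.mem_cons_of_mem p hq))
        (fun q hq => by
          rw [List.getD_eq_getElem?_getD, List.getElem?_set_ne (by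
            exact fun hc => hne_tl q hq (by omega)), ← List.getD_eq_getElem?_getD]
          exact h0 q (List.mem_cons_of_mem p hq))
        ha0 hale htl_jlt
      obtain ⟨ihlen, ihfix, ihval⟩ := ih'
      rw [List.foldl_cons, hstep]
      refine ⟨by rw [ihlen, hlen'], ?_, ?_⟩
      · intro i hi
        rw [ihfix i (fun q hq => hi q (List.mem_cons_of_mem p hq))]
        rw [List.getD_eq_getElem?_getD, List.getElem?_set_ne (by
          exact fun hc => hi p (List.mem_cons_self) (by omega)), ← List.getD_eq_getElem?_getD]
      · intro q hq
        rcases List.mem_cons.mp hq with hq1 | hq2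
        · subst hq1
          rw [ihfix q.1.toNat (fun r hr => hne_tl r hr)]
          rw [List.getD_eq_getElem?_getD, List.getElem?_set_self (by omega), Option.getD_some]
          rw [if_pos (hhit_iff.mp hhit)]
        · exact ihval q hq2
    · -- miss: answer unchanged (position p.1 keeps its initial 0)
      have hstep : bStep cl N (ans, j) p = (ans, j') := by
        simp only [bStep, ← hj', if_neg hhit]
      have ih' := ih ans j' htl_sort htl_nd
        (fun q hq => hidx q (List.mem_cons_of_mem p hq))
        (fun q hq => h0 q (List.mem_cons_of_mem p hq))
        ha0 hale htl_jlt
      obtain ⟨ihlen, ihfix, ihval⟩ := ih'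
      rw [List.foldl_cons, hstep]
      refine ⟨ihlen, ?_, ?_⟩
      · intro i hi
        exact ihfix i (fun q hq => hi q (List.mem_cons_of_mem p hq))
      · intro q hq
        rcases List.mem_cons.mp hq with hq1 | hq2
        · subst hq1
          rw [ihfix q.1.toNat (fun r hr => hne_tl r hr)]
          rw [if_neg (fun hm => hhit (hhit_iff.mpr hm))]
          exact h0 q (List.mem_cons_self)
        · exact ihval q hq2

-- ===== VERDICT (by name: the statement is the Claim_ definition above) =====
theorem solution_spec : Claim_equal_solution := by
  intro N M card_list m_list _hdom hpre
  unfold Spec_solution Pre_solution at *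
  rcases hpre with hN | hml
  · unfold solution solution_alt
    set cl := PySem.List.sorted card_list (fun x => x) false with hcl
    have hlen : (cl.length : Int) = (card_list.length : Int) := by
      rw [hcl, PySem.List.length_sorted]
    have hNlen : N ≤ (cl.length : Int) := by omega
    have hpw : cl.Pairwise (· ≤ ·) := PySem.List.sorted_pairwise card_list (fun x => x)
    -- A's output is the per-query membership map
    have hA : m_list.foldl (fun answer m => if isExist N cl m then answer ++ [1] else answer ++ [0]) []
        = m_list.map (fun m => if m ∈ cl.take (max N 0).toNat then (1:Int) else 0) := by
      refine Eq.trans (foldl_if_append (fun m => isExist N cl m) m_list []) ?_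
      rw [List.nil_append]
      apply List.map_congr_left
      intro m _
      unfold isExist
      by_cases hb : m ∈ cl.take (max N 0).toNat
      · rw [if_pos ((isExist_mem_take cl m N hpw hNlen).mpr hb), if_pos hb]
      · rw [if_neg (fun h => hb ((isExist_mem_take cl m N hpw hNlen).mp h)), if_neg hb]
    rw [hA]
    -- B's fold writes the same bit at each position
    set order := PySem.List.sorted (PySem.List.enumerate m_list) (fun p => p.2) false with horder
    have hperm : order.Perm (PySem.List.enumerate m_list) :=
      PySem.List.sorted_perm (PySem.List.enumerate m_list) (fun p => p.2) false
    have hmem_order : ∀ p, p ∈ order ↔ ∃ (k : ℕ) (hk : k < m_list.length), p = ((k : Int), m_list[k]) := by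
      intro p
      rw [hperm.mem_iff, PySem.List.mem_enumerate_iff]
      constructor
      · rintro ⟨k, hk, hp⟩; exact ⟨k, hk, by simpa using hp⟩
      · rintro ⟨k, hk, hp⟩; exact ⟨k, hk, by simpa using hp⟩
    have hnd : (order.map Prod.fst).Nodup := by
      have hperm2 : (order.map Prod.fst).Perm ((PySem.List.enumerate m_list).map Prod.fst) :=
        hperm.map Prod.fst
      refine hperm2.nodup_iff.mpr ?_
      rw [PySem.List.map_fst_enumerate]
      exact PySem.List.nodup_pyRange_one 0 (0 + m_list.length)
    have hfold := bFold_spec cl N hpw hNlen order (List.replicate m_list.length 0) 0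
      (PySem.List.sorted_pairwise (PySem.List.enumerate m_list) (fun p => p.2))
      hnd
      (by
        intro p hp
        obtain ⟨k, hk, hp⟩ := (hmem_order p).mp hp
        subst hp
        simpa using hk)
      (by
        intro p hp
        obtain ⟨k, hk, hp⟩ := (hmem_order p).mp hp
        subst hp
        simp [List.getD_eq_getElem?_getD, hk])
      (le_refl 0) (by omega)
      (by intro p hp k hk; omega)
    obtain ⟨hblen, _, hbval⟩ := hfold
    refine List.ext_getElem (by simpa using hblen.symm) ?_
    intro i h1 h2
    have hi : i < m_list.length := by simpa using h1
    have hp : ((i : Int), m_list[i]) ∈ order := (hmem_order _).mpr ⟨i, hi, rfl⟩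
    have := hbval _ hp
    simp only [Int.toNat_natCast] at this
    rw [List.getElem_map]
    rw [List.getD_eq_getElem ((order.foldl (bStep cl N) (List.replicate m_list.length 0, 0)).1) 0 (by
      rw [hblen]; simpa using hi)] at this
    exact this.symm
  · subst hml
    have h1 : PySem.List.sorted ([] : List (Int × Int)) (fun p => p.2) false = [] := by decide
    simp [solution, solution_alt, h1]
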